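-- pv_equiv track=rewrite | github.com/Si-cyber-ai/SARAL | models/model.py | find_closest_state_code
-- ===== SOURCE A (Python) =====
-- from typing import Any, Dict, List, Optional, Tuple
--
-- INDIAN_STATE_CODES: set[str] = {
--     "AN", "AP", "AR", "AS", "BR", "CG", "CH", "DD", "DL", "GA",
--     "GJ", "HP", "HR", "JH", "JK", "KA", "KL", "LA", "LD", "MH",
--     "ML", "MN", "MP", "MZ", "NL", "OD", "OR", "PB", "PY", "RJ",
--     "SK", "TN", "TR", "TS", "UK", "UP", "WB",
-- }
--
-- LETTER_CANDIDATES: Dict[str, List[str]] = {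
--     "0": ["O", "D", "Q"],
--     "1": ["I", "L"],
--     "2": ["Z"],
--     "3": ["E"],
--     "4": ["A", "H"],
--     "5": ["S"],
--     "6": ["G"],
--     "7": ["T"],
--     "8": ["B"],
-- }
--
-- SIMILAR_LETTERS: Dict[str, List[str]] = {
--     "H": ["M", "N", "W"], "M": ["H", "N", "W"],
--     "N": ["H", "M"],      "W": ["M", "H"],
--     "C": ["G", "O"],      "G": ["C", "O"],
--     "P": ["R", "B"],      "R": ["P", "B"],
--     "B": ["R", "P", "D"], "D": ["O", "B"],
--     "U": ["V"],           "V": ["U"],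
--     "T": ["A", "I"],      "A": ["H"],
--     "Y": ["V"],           "I": ["T", "L"],
--     "E": ["F"],           "F": ["E", "P"],
-- }
--
-- def find_closest_state_code(two_chars: str) -> str:
--     """
--     Given two characters, find the closest valid Indian RTO state code.
--
--     Tries all one-character edits using SIMILAR_LETTERS and LETTER_CANDIDATES.
--     Returns the original string unchanged if no close match is found.
--     """
--     two_chars = two_chars.upper()
--     if two_chars in INDIAN_STATE_CODES:
--         return two_chars
--
--     c0, c1 = two_chars[0], two_chars[1]
--     alts_0 = [c0] + SIMILAR_LETTERS.get(c0, []) + LETTER_CANDIDATES.get(c0, [])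
--     alts_1 = [c1] + SIMILAR_LETTERS.get(c1, []) + LETTER_CANDIDATES.get(c1, [])
--
--     candidates: List[Tuple[int, str]] = []
--     for a0 in alts_0:
--         for a1 in alts_1:
--             code = a0 + a1
--             if code in INDIAN_STATE_CODES:
--                 dist = (0 if a0 == c0 else 1) + (0 if a1 == c1 else 1)
--                 candidates.append((dist, code))
--
--     if candidates:
--         candidates.sort()
--         return candidates[0][1]
--
--     return two_chars
-- ===== SOURCE B (Python) =====
-- from typing import Dict, List, Optional
--
-- INDIAN_STATE_CODES: set[str] = {
--     "AN", "AP", "AR", "AS", "BR", "CG", "CH", "DD", "DL", "GA",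
--     "GJ", "HP", "HR", "JH", "JK", "KA", "KL", "LA", "LD", "MH",
--     "ML", "MN", "MP", "MZ", "NL", "OD", "OR", "PB", "PY", "RJ",
--     "SK", "TN", "TR", "TS", "UK", "UP", "WB",
-- }
--
-- LETTER_CANDIDATES: Dict[str, List[str]] = {
--     "0": ["O", "D", "Q"],
--     "1": ["I", "L"],
--     "2": ["Z"],
--     "3": ["E"],
--     "4": ["A", "H"],
--     "5": ["S"],
--     "6": ["G"],
--     "7": ["T"],
--     "8": ["B"],
-- }
--
-- SIMILAR_LETTERS: Dict[str, List[str]] = {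
--     "H": ["M", "N", "W"], "M": ["H", "N", "W"],
--     "N": ["H", "M"],      "W": ["M", "H"],
--     "C": ["G", "O"],      "G": ["C", "O"],
--     "P": ["R", "B"],      "R": ["P", "B"],
--     "B": ["R", "P", "D"], "D": ["O", "B"],
--     "U": ["V"],           "V": ["U"],
--     "T": ["A", "I"],      "A": ["H"],
--     "Y": ["V"],           "I": ["T", "L"],
--     "E": ["F"],           "F": ["E", "P"],
-- }
--
--
-- def _edit_cost(x: str, c: str) -> Optional[int]:
--     """Cost of reading c as x: 0 if equal, 1 if confusable, None otherwise."""
--     if x == c: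
--         return 0
--     if x in SIMILAR_LETTERS.get(c, []) or x in LETTER_CANDIDATES.get(c, []):
--         return 1
--     return None
--
--
-- def find_closest_state_code(two_chars: str) -> str:
--     two_chars = two_chars.upper()
--     if two_chars in INDIAN_STATE_CODES:
--         return two_chars
--
--     c0, c1 = two_chars[0], two_chars[1]
--     best = None
--     for code in INDIAN_STATE_CODES:
--         d0 = _edit_cost(code[0], c0)
--         d1 = _edit_cost(code[1], c1)
--         if d0 is None or d1 is None:
--             continue
--         cand = (d0 + d1, code)
--         if best is None or cand < best:
--             best = cand
--
--     return best[1] if best is not None else two_chars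
-- ===== Notes on version B (the rewrite author's own statement) =====
-- stated objective: alternative
-- what changed: B drops A's candidate-generation (cartesian product of alternative letters, build list, sort, take head) and instead scans the 37 valid state codes once, scoring each code's two letters against the input with a per-letter edit cost and tracking the lexicographic minimum (distance, code) on the fly.
import Mathlib
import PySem

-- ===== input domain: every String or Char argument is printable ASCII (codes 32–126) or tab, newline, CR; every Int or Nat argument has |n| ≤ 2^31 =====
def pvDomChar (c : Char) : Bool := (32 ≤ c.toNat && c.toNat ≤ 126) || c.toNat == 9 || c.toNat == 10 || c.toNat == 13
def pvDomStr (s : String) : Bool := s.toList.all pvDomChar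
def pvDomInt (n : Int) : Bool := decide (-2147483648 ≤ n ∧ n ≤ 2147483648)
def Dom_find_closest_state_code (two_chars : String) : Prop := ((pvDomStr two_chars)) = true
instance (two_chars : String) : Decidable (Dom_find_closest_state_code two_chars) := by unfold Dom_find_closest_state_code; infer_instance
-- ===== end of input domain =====

-- B replaces A's generate-alternatives/filter/sort pipeline by a single scan over the 37 valid
-- state codes that tracks the lexicographic minimum (distance, code); alternative algorithm, same results.

-- shared module constants (the same tables both Pythons read)
def pvCodes : PySem.Set String := PySem.Set.ofList
  ["AN", "AP", "AR", "AS", "BR", "CG", "CH", "DD", "DL", "GA",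
   "GJ", "HP", "HR", "JH", "JK", "KA", "KL", "LA", "LD", "MH",
   "ML", "MN", "MP", "MZ", "NL", "OD", "OR", "PB", "PY", "RJ",
   "SK", "TN", "TR", "TS", "UK", "UP", "WB"]

def pvLetterCandidates : PySem.Dict Char (List Char) := PySem.Dict.ofList
  [('0', ['O', 'D', 'Q']), ('1', ['I', 'L']), ('2', ['Z']), ('3', ['E']),
   ('4', ['A', 'H']), ('5', ['S']), ('6', ['G']), ('7', ['T']), ('8', ['B'])]

def pvSimilarLetters : PySem.Dict Char (List Char) := PySem.Dict.ofList
  [('H', ['M', 'N', 'W']), ('M', ['H', 'N', 'W']), ('N', ['H', 'M']), ('W', ['M', 'H']),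
   ('C', ['G', 'O']), ('G', ['C', 'O']), ('P', ['R', 'B']), ('R', ['P', 'B']),
   ('B', ['R', 'P', 'D']), ('D', ['O', 'B']), ('U', ['V']), ('V', ['U']),
   ('T', ['A', 'I']), ('A', ['H']), ('Y', ['V']), ('I', ['T', 'L']),
   ('E', ['F']), ('F', ['E', 'P'])]

-- ===== PORT A =====
-- A-side helpers: the alts_0/alts_1 lists and the candidate-building double loop, named
def pvAlts (c : Char) : List Char :=
  [c] ++ pvSimilarLetters.getD c [] ++ pvLetterCandidates.getD c []

def pvCandidates (c0 c1 : Char) : List (Int × String) :=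
  (pvAlts c0).foldl (fun acc a0 =>
    (pvAlts c1).foldl (fun acc a1 =>
      if String.ofList [a0, a1] ∈ pvCodes then
        acc ++ [((if a0 = c0 then (0 : Int) else 1) + (if a1 = c1 then (0 : Int) else 1),
                 String.ofList [a0, a1])]
      else acc) acc) []

def find_closest_state_code (two_chars : String) : String :=
  let tc := PySem.Str.upper two_chars
  if tc ∈ pvCodes then tc
  else
    match PySem.Str.pyGet? tc 0, PySem.Str.pyGet? tc 1 with
    | some c0, some c1 =>
      let candidates := pvCandidates c0 c1
      if candidates.isEmpty then tc
      else
        match PySem.List.sorted2 candidates Prod.fst Prod.snd false with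
        | c :: _ => c.2
        | [] => tc
    | _, _ => tc   -- Python raises IndexError here (input shorter than 2 chars): outside Pre_

-- ===== PORT B =====
-- B-side helper: _edit_cost
def pvEditCost (x c : Char) : Option Int :=
  if x = c then some 0
  else if x ∈ pvSimilarLetters.getD c [] ∨ x ∈ pvLetterCandidates.getD c [] then some 1
  else none

def find_closest_state_code_alt (two_chars : String) : String :=
  let tc := PySem.Str.upper two_chars
  if tc ∈ pvCodes then tc
  else
    match PySem.Str.pyGet? tc 0 with
    | none => tc   -- Python raises IndexError here (input shorter than 2 chars): outside Pre_
    | some c0 =>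
      match PySem.Str.pyGet? tc 1 with
      | none => tc   -- Python raises IndexError here: outside Pre_
      | some c1 =>
        let best := pvCodes.foldl (fun best code =>
          match PySem.Str.pyGet? code 0 with
          | none => best
          | some x =>
            match PySem.Str.pyGet? code 1 with
            | none => best
            | some y =>
              match pvEditCost x c0 with
              | none => best
              | some d0 =>
                match pvEditCost y c1 with
                | none => best
                | some d1 =>
                  match best with
                  | none => some (d0 + d1, code)
                  | some b =>
                    if d0 + d1 < b.1 ∨ (d0 + d1 = b.1 ∧ code < b.2) then some (d0 + d1, code)
                    else some b) none
        match best with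
        | some b => b.2
        | none => tc

-- ===== PRECONDITION & SPEC =====
-- Pre_ excludes exactly the inputs with fewer than two characters, on which both Pythons raise IndexError.
def Pre_find_closest_state_code (two_chars : String) : Prop := 2 ≤ two_chars.toList.length
instance (two_chars : String) : Decidable (Pre_find_closest_state_code two_chars) := by
  unfold Pre_find_closest_state_code; infer_instance
def pvWitness_find_closest_state_code : String := "MH"

def Spec_find_closest_state_code (two_chars : String) (out : String) : Prop := out = find_closest_state_code_alt two_chars
instance (two_chars : String) (out : String) : Decidable (Spec_find_closest_state_code two_chars out) := by unfold Spec_find_closest_state_code; infer_instance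

-- ===== CLAIM (what is proved, stated in full; the proofs are below) =====
def Claim_equal_find_closest_state_code : Prop := ∀ (two_chars : String), Dom_find_closest_state_code two_chars → Pre_find_closest_state_code two_chars → Spec_find_closest_state_code two_chars (find_closest_state_code two_chars)

-- ===== LEMMAS AND PROOFS =====

lemma pvGet0 (t : String) (a b : Char) (r : List Char) (h : t.toList = a :: b :: r) :
    PySem.Str.pyGet? t 0 = some a := by
  have hp : (0:Int) ≤ (r.length:Int) + 1 := by positivity
  simp [PySem.Str.pyGet?, h, PySem.List.pyGet?, PySem.List.pyIdx?, hp]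

lemma pvGet1 (t : String) (a b : Char) (r : List Char) (h : t.toList = a :: b :: r) :
    PySem.Str.pyGet? t 1 = some b := by
  have hp : (0:Int) ≤ (r.length:Int) := by positivity
  simp [PySem.Str.pyGet?, h, PySem.List.pyGet?, PySem.List.pyIdx?, hp]

-- B's per-code feasibility/score function, named for the proofs
def pvG (c0 c1 : Char) (code : String) : Option (Int × String) :=
  match PySem.Str.pyGet? code 0, PySem.Str.pyGet? code 1 with
  | some x, some y =>
    match pvEditCost x c0, pvEditCost y c1 with
    | some d0, some d1 => some (d0 + d1, code)
    | _, _ => none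
  | _, _ => none

def pvOmin (best : Option (Int × String)) (p : Int × String) : Option (Int × String) :=
  match best with
  | none => some p
  | some b => if p.1 < b.1 ∨ (p.1 = b.1 ∧ p.2 < b.2) then some p else some b

lemma pvLt_iff (p q : Int × String) :
    (p.1 < q.1 ∨ (p.1 = q.1 ∧ p.2 < q.2)) ↔ (toLex p < toLex q) := by
  simp [Prod.Lex.lt_iff]

lemma pvOmin_ne_none (acc : Option (Int × String)) (p : Int × String) :
    pvOmin acc p ≠ none := by
  rcases acc with _ | b
  · simp [pvOmin]
  · simp only [pvOmin]
    split_ifs <;> simp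

lemma pvStep_eq (c0 c1 : Char) (best : Option (Int × String)) (code : String) :
    (match PySem.Str.pyGet? code 0 with
     | none => best
     | some x =>
       match PySem.Str.pyGet? code 1 with
       | none => best
       | some y =>
         match pvEditCost x c0 with
         | none => best
         | some d0 =>
           match pvEditCost y c1 with
           | none => best
           | some d1 =>
             match best with
             | none => some (d0 + d1, code)
             | some b =>
               if d0 + d1 < b.1 ∨ (d0 + d1 = b.1 ∧ code < b.2) then some (d0 + d1, code)
               else some b)
    = match pvG c0 c1 code with
      | some p => pvOmin best p
      | none => best := by
  rcases h0 : PySem.Str.pyGet? code 0 with _ | x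
  · simp only [pvG, h0]
  rcases h1 : PySem.Str.pyGet? code 1 with _ | y
  · simp only [pvG, h0, h1]
  rcases h2 : pvEditCost x c0 with _ | d0
  · simp only [pvG, h0, h1, h2]
  rcases h3 : pvEditCost y c1 with _ | d1
  · simp only [pvG, h0, h1, h2, h3]
  rcases best with _ | b <;> simp only [pvG, pvOmin, h0, h1, h2, h3]

lemma pvOmin_spec (acc : Option (Int × String)) (p q : Int × String)
    (h : pvOmin acc p = some q) :
    (q = p ∨ acc = some q) ∧ toLex q ≤ toLex p ∧ (∀ b, acc = some b → toLex q ≤ toLex b) := by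
  rcases acc with _ | b
  · simp only [pvOmin] at h
    cases h
    exact ⟨Or.inl rfl, le_refl _, by simp⟩
  · simp only [pvOmin] at h
    split_ifs at h with hlt
    · rw [pvLt_iff] at hlt
      cases h
      refine ⟨Or.inl rfl, le_refl _, ?_⟩
      rintro b' ⟨rfl⟩
      exact le_of_lt hlt
    · rw [pvLt_iff] at hlt
      cases h
      refine ⟨Or.inr rfl, le_of_not_gt hlt, ?_⟩
      rintro b' ⟨rfl⟩
      exact le_refl _

lemma pvFold_min (c0 c1 : Char) (l : List String) :
    ∀ acc : Option (Int × String),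
      (l.foldl (fun b x => match pvG c0 c1 x with | some p => pvOmin b p | none => b) acc = none
        ↔ acc = none ∧ ∀ x ∈ l, pvG c0 c1 x = none)
      ∧ (∀ m, l.foldl (fun b x => match pvG c0 c1 x with | some p => pvOmin b p | none => b) acc = some m →
          (acc = some m ∨ ∃ x ∈ l, pvG c0 c1 x = some m)
          ∧ (∀ b, acc = some b → toLex m ≤ toLex b)
          ∧ (∀ x ∈ l, ∀ p, pvG c0 c1 x = some p → toLex m ≤ toLex p)) := by
  induction l with
  | nil =>
    intro acc
    refine ⟨by simp, fun m hm => ?_⟩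
    simp only [List.foldl_nil] at hm
    refine ⟨Or.inl hm, fun b hb => ?_, by simp⟩
    rw [hb] at hm
    cases hm
    exact le_refl _
  | cons x l ih =>
    intro acc
    rcases hg : pvG c0 c1 x with _ | p
    · constructor
      · simp only [List.foldl_cons, hg]
        rw [(ih acc).1]
        constructor
        · rintro ⟨h1, h2⟩
          refine ⟨h1, ?_⟩
          intro y hy
          rcases List.mem_cons.1 hy with rfl | hy'
          · exact hg
          · exact h2 y hy'
        · rintro ⟨h1, h2⟩
          exact ⟨h1, fun y hy => h2 y (List.mem_cons_of_mem _ hy)⟩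
      · intro m hm
        simp only [List.foldl_cons, hg] at hm
        obtain ⟨horig, hacc, hall⟩ := (ih acc).2 m hm
        refine ⟨?_, hacc, ?_⟩
        · rcases horig with h | ⟨y, hy, hgy⟩
          · exact Or.inl h
          · exact Or.inr ⟨y, List.mem_cons_of_mem _ hy, hgy⟩
        · intro y hy p hp
          rcases List.mem_cons.1 hy with rfl | hy'
          · rw [hg] at hp; cases hp
          · exact hall y hy' p hp
    · rcases homin : pvOmin acc p with _ | q
      · exact absurd homin (pvOmin_ne_none acc p)
      obtain ⟨hq1, hq2, hq3⟩ := pvOmin_spec acc p q homin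
      constructor
      · simp only [List.foldl_cons, hg, homin]
        rw [(ih (some q)).1]
        constructor
        · rintro ⟨h1, _⟩; cases h1
        · rintro ⟨_, h2⟩
          have hx' := h2 x List.mem_cons_self
          rw [hg] at hx'
          cases hx'
      · intro m hm
        simp only [List.foldl_cons, hg, homin] at hm
        obtain ⟨horig, hacc, hall⟩ := (ih (some q)).2 m hm
        have hmq : toLex m ≤ toLex q := hacc q rfl
        refine ⟨?_, ?_, ?_⟩
        · rcases horig with hh | ⟨y, hy, hgy⟩
          · cases hh
            rcases hq1 with rfl | hb
            · exact Or.inr ⟨x, List.mem_cons_self, hg⟩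
            · exact Or.inl hb
          · exact Or.inr ⟨y, List.mem_cons_of_mem _ hy, hgy⟩
        · intro b hb
          exact le_trans hmq (hq3 b hb)
        · intro y hy p' hp'
          rcases List.mem_cons.1 hy with rfl | hy'
          · rw [hg] at hp'
            cases hp'
            exact le_trans hmq hq2
          · exact hall y hy' p' hp'

lemma pvCandidates_eq (c0 c1 : Char) :
    pvCandidates c0 c1 =
      (pvAlts c0).flatMap (fun a0 =>
        ((pvAlts c1).filter (fun a1 => decide (String.ofList [a0, a1] ∈ pvCodes))).map
          (fun a1 => ((if a0 = c0 then (0 : Int) else 1) + (if a1 = c1 then (0 : Int) else 1),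
                      String.ofList [a0, a1]))) := by
  unfold pvCandidates
  rw [PySem.List.foldl_congr_mem _ _
      (fun acc a0 => acc ++
        ((pvAlts c1).filter (fun a1 => decide (String.ofList [a0, a1] ∈ pvCodes))).map
          (fun a1 => ((if a0 = c0 then (0 : Int) else 1) + (if a1 = c1 then (0 : Int) else 1),
                      String.ofList [a0, a1]))) _
      (fun acc x _ => PySem.List.foldl_append_ite _ _ _ _)]
  rw [PySem.List.foldl_append_eq_flatMap]
  simp

lemma pvCost_of_mem_alts (a c : Char) (h : a ∈ pvAlts c) :
    pvEditCost a c = some (if a = c then 0 else 1) := by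
  simp only [pvAlts, List.cons_append, List.nil_append, List.mem_cons, List.mem_append] at h
  by_cases hac : a = c
  · simp [pvEditCost, hac]
  · have hmem : a ∈ pvSimilarLetters.getD c [] ∨ a ∈ pvLetterCandidates.getD c [] := by tauto
    simp [pvEditCost, hac, hmem]

lemma pvMem_alts_of_cost (a c : Char) (d : Int) (h : pvEditCost a c = some d) :
    a ∈ pvAlts c ∧ d = (if a = c then (0 : Int) else 1) := by
  unfold pvEditCost at h
  split_ifs at h with h1 h2
  · cases h
    exact ⟨by simp [pvAlts, h1], by simp [h1]⟩
  · cases h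
    refine ⟨?_, by simp [h1]⟩
    simp only [pvAlts, List.cons_append, List.nil_append, List.mem_cons, List.mem_append]
    tauto

lemma pvCodes_len2 : ∀ s ∈ (pvCodes : List String), s.toList.length = 2 := by decide

lemma pvMem_candidates (c0 c1 : Char) (p : Int × String) :
    p ∈ pvCandidates c0 c1 ↔ ∃ code ∈ (pvCodes : List String), pvG c0 c1 code = some p := by
  rw [pvCandidates_eq]
  simp only [List.mem_flatMap, List.mem_map, List.mem_filter, decide_eq_true_eq]
  constructor
  · rintro ⟨a0, h0, a1, ⟨h1, hin⟩, rfl⟩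
    refine ⟨String.ofList [a0, a1], hin, ?_⟩
    simp [pvG, pvCost_of_mem_alts a0 c0 h0, pvCost_of_mem_alts a1 c1 h1]
  · rintro ⟨code, hcode, hG⟩
    have hlen := pvCodes_len2 code hcode
    rcases hx : code.toList with _ | ⟨x, l1⟩
    · rw [hx] at hlen; simp at hlen
    rcases l1 with _ | ⟨y, rest⟩
    · rw [hx] at hlen; simp at hlen
    have hrest : rest = [] := by
      rw [hx] at hlen; simpa using hlen
    subst hrest
    have hcode_eq : code = String.ofList [x, y] := by
      rw [← hx]; simp
    have e0 : PySem.Str.pyGet? code 0 = some x := pvGet0 _ x y [] hx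
    have e1 : PySem.Str.pyGet? code 1 = some y := pvGet1 _ x y [] hx
    simp only [pvG, e0, e1] at hG
    rcases hc0 : pvEditCost x c0 with _ | d0
    · simp only [hc0] at hG
      cases hG
    rcases hc1 : pvEditCost y c1 with _ | d1
    · simp only [hc0, hc1] at hG
      cases hG
    simp only [hc0, hc1] at hG
    obtain ⟨hm0, hd0⟩ := pvMem_alts_of_cost x c0 d0 hc0
    obtain ⟨hm1, hd1⟩ := pvMem_alts_of_cost y c1 d1 hc1
    cases hG
    exact ⟨x, hm0, y, ⟨hm1, hcode_eq ▸ hcode⟩, by rw [← hcode_eq, ← hd0, ← hd1]⟩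

lemma pvBefore_eq :
    (fun (a b : Int × String) => decide (a.1 < b.1) || (!decide (b.1 < a.1) && decide (a.2 < b.2)))
      = fun a b => decide ((toLex a : Lex (Int × String)) < toLex b) := by
  funext a b
  by_cases h1 : a.1 < b.1
  · simp [h1, Prod.Lex.lt_iff]
  · by_cases h2 : b.1 < a.1
    · have hne : a.1 ≠ b.1 := fun h => absurd (h ▸ h2) (lt_irrefl _)
      simp [h1, h2, Prod.Lex.lt_iff, hne]
    · have heq : a.1 = b.1 := le_antisymm (le_of_not_gt h2) (le_of_not_gt h1)
      by_cases h3 : a.2 < b.2 <;> simp [h3, Prod.Lex.lt_iff, heq]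

lemma pvPairwise_foldl_insertBy (xs : List (Int × String)) :
    ∀ acc : List (Int × String),
      acc.Pairwise (fun a b => (toLex a : Lex (Int × String)) ≤ toLex b) →
      (xs.foldl (fun acc x =>
        PySem.List.insertBy (fun a b => decide ((toLex a : Lex (Int × String)) < toLex b)) x acc) acc).Pairwise
        (fun a b => (toLex a : Lex (Int × String)) ≤ toLex b) := by
  induction xs with
  | nil => intro acc h; simpa using h
  | cons x xs ih =>
    intro acc h
    exact ih _ (PySem.List.insertBy_pairwise_le (fun p => (toLex p : Lex (Int × String))) x acc h)

lemma pvSorted_head (xs : List (Int × String)) (h : Int × String) (tl : List (Int × String))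
    (hs : PySem.List.sorted2 xs Prod.fst Prod.snd false = h :: tl) :
    h ∈ xs ∧ ∀ y ∈ xs, (toLex h : Lex (Int × String)) ≤ toLex y := by
  have hdef : PySem.List.sorted2 xs Prod.fst Prod.snd false
      = xs.foldl (fun acc x =>
          PySem.List.insertBy (fun a b => decide ((toLex a : Lex (Int × String)) < toLex b)) x acc) [] := by
    unfold PySem.List.sorted2
    simp only [Bool.false_eq_true, if_false]
    rw [pvBefore_eq]
  rw [hdef] at hs
  have hperm : (xs.foldl (fun acc x =>
      PySem.List.insertBy (fun a b => decide ((toLex a : Lex (Int × String)) < toLex b)) x acc) []).Perm xs := by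
    simpa using PySem.List.foldl_insertBy_perm
      (fun a b => decide ((toLex a : Lex (Int × String)) < toLex b)) xs []
  have hpw := pvPairwise_foldl_insertBy xs [] (by simp)
  rw [hs] at hperm hpw
  refine ⟨hperm.mem_iff.1 List.mem_cons_self, ?_⟩
  intro y hy
  rcases List.mem_cons.1 (hperm.mem_iff.2 hy) with rfl | hy'
  · exact le_refl _
  · exact (List.pairwise_cons.1 hpw).1 y hy'

lemma pvMain (two_chars : String) (hpre : Pre_find_closest_state_code two_chars) :
    find_closest_state_code two_chars = find_closest_state_code_alt two_chars := by
  by_cases hmem : PySem.Str.upper two_chars ∈ pvCodes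
  · simp [find_closest_state_code, find_closest_state_code_alt, hmem]
  · have hlen : 2 ≤ (PySem.Str.upper two_chars).toList.length := by
      have hup : (PySem.Str.upper two_chars).toList.length = two_chars.toList.length := by
        simp [PySem.Str.toList_upper, PySem.Chars.upper]
      rw [hup]; exact hpre
    rcases ht : (PySem.Str.upper two_chars).toList with _ | ⟨c0, l1⟩
    · rw [ht] at hlen; simp at hlen
    rcases l1 with _ | ⟨c1, rest⟩
    · rw [ht] at hlen; simp at hlen
    have hg0 := pvGet0 _ c0 c1 rest ht
    have hg1 := pvGet1 _ c0 c1 rest ht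
    simp only [find_closest_state_code, find_closest_state_code_alt, hmem, if_false, hg0, hg1]
    rw [PySem.List.foldl_congr_mem pvCodes _
        (fun b x => match pvG c0 c1 x with | some p => pvOmin b p | none => b) none
        (fun acc x _ => pvStep_eq c0 c1 acc x)]
    by_cases hnil : pvCandidates c0 c1 = []
    · have hnone : pvCodes.foldl
          (fun b x => match pvG c0 c1 x with | some p => pvOmin b p | none => b) none = none := by
        rw [(pvFold_min c0 c1 pvCodes none).1]
        refine ⟨rfl, fun x hx => ?_⟩
        rcases hgx : pvG c0 c1 x with _ | p
        · rfl
        · exact absurd ((pvMem_candidates c0 c1 p).2 ⟨x, hx, hgx⟩) (by simp [hnil])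
      rw [hnil, hnone]
      simp
    · rcases hs : PySem.List.sorted2 (pvCandidates c0 c1) Prod.fst Prod.snd false with _ | ⟨hd, tl⟩
      · exact absurd (hs ▸ PySem.List.sorted2_perm (pvCandidates c0 c1) Prod.fst Prod.snd false).symm.eq_nil hnil
      obtain ⟨hhmem, hhmin⟩ := pvSorted_head _ hd tl hs
      rcases hf : pvCodes.foldl
          (fun b x => match pvG c0 c1 x with | some p => pvOmin b p | none => b) none with _ | m
      · obtain ⟨-, hallnone⟩ := ((pvFold_min c0 c1 pvCodes none).1).1 hf
        obtain ⟨code, hcode, hgcode⟩ := (pvMem_candidates c0 c1 hd).1 hhmem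
        rw [hallnone code hcode] at hgcode
        cases hgcode
      · obtain ⟨horig, -, hall⟩ := (pvFold_min c0 c1 pvCodes none).2 m hf
        rcases horig with hh | ⟨code, hcode, hgm⟩
        · cases hh
        have hmmem : m ∈ pvCandidates c0 c1 := (pvMem_candidates c0 c1 m).2 ⟨code, hcode, hgm⟩
        obtain ⟨code', hcode', hghd⟩ := (pvMem_candidates c0 c1 hd).1 hhmem
        have hle1 : (toLex hd : Lex (Int × String)) ≤ toLex m := hhmin m hmmem
        have hle2 : (toLex m : Lex (Int × String)) ≤ toLex hd := hall code' hcode' hd hghd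
        have heq : hd = m := toLex.injective (le_antisymm hle1 hle2)
        simp [hf, hnil, heq]

-- ===== VERDICT (by name: the statement is the Claim_ definition above) =====
theorem find_closest_state_code_spec : Claim_equal_find_closest_state_code := by
  intro two_chars _ hpre
  unfold Spec_find_closest_state_code
  exact pvMain two_chars hpre
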